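-- pv_equiv track=rewrite | github.com/bergerjacob/RelCube | cube_converter.py | parse_moves
-- ===== SOURCE A (Python) =====
-- from typing import List
--
-- def parse_moves(moves_str: str) -> List[str]:
--     """Parse a string of moves into a list."""
--     moves = []
--     i = 0
--     moves_str = moves_str.strip()
--     while i < len(moves_str):
--         if moves_str[i] in 'URFDLB':
--             move = moves_str[i]
--             i += 1
--             if i < len(moves_str) and moves_str[i] in "'2":
--                 move += moves_str[i]
--                 i += 1
--             moves.append(move)
--         elif moves_str[i].isspace():
--             i += 1
--         else:
--             raise ValueError(f"Invalid character: {moves_str[i]} at position {i}")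
--     return moves
-- ===== SOURCE B (Python) =====
-- def parse_moves(moves_str):
--     """Parse a string of moves into a list (single right-to-left pass:
--     a modifier is held pending until its face letter arrives)."""
--     moves = []
--     pending = ''
--     for c in reversed(moves_str.strip()):
--         if c in "'2":
--             if pending:
--                 raise ValueError(f"Invalid character: {c}")
--             pending = c
--         elif c in 'URFDLB':
--             moves.append(c + pending)
--             pending = ''
--         elif c.isspace():
--             if pending:
--                 raise ValueError(f"Invalid character: {pending}")
--         else:
--             raise ValueError(f"Invalid character: {c}")
--     if pending:
--         raise ValueError(f"Invalid character: {pending}")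
--     moves.reverse()
--     return moves
-- ===== Notes on version B (the rewrite author's own statement) =====
-- stated objective: alternative
-- what changed: Replaces A's forward cursor loop (peek ahead to consume an optional modifier after each face letter) with a single right-to-left pass that holds a pending modifier until its face letter arrives, building the move list back-to-front.
import Mathlib
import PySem

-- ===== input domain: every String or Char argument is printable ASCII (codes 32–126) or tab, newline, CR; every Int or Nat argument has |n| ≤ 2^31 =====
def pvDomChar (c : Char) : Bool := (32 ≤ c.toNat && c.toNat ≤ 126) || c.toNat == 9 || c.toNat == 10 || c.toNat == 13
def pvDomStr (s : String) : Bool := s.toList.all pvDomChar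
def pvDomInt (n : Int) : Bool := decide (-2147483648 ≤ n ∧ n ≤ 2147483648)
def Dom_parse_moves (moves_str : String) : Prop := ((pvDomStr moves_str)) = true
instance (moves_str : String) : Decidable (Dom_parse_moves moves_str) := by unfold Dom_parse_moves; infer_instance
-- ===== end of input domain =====

-- B replaces A's forward peek-ahead cursor loop by a right-to-left pass with a pending modifier; same cost, different traversal.

def faceA (c : Char) : Bool := c = 'U' || c = 'R' || c = 'F' || c = 'D' || c = 'L' || c = 'B'
def modA (c : Char) : Bool := c = '\'' || c = '2'

-- ===== PORT A =====
-- the while loop of A, as recursion on the remaining characters; the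
-- `raise ValueError` branch (excluded by Pre_) returns [].
def parseLoop : List Char → List String
  | [] => []
  | c :: rest =>
    if faceA c then
      match rest with
      | [] => [String.ofList [c]]
      | d :: rest2 =>
        if modA d then String.ofList [c, d] :: parseLoop rest2
        else String.ofList [c] :: parseLoop (d :: rest2)
    else if PySem.Chars.isspace c then parseLoop rest
    else []

def parse_moves (moves_str : String) : List String :=
  parseLoop (PySem.Chars.strip moves_str.toList)

-- ===== PORT B =====
-- one step of B's reversed-iteration loop; the `raise` branches (excluded
-- by Pre_) leave the state unchanged.
def stepB (st : String × List String) (c : Char) : String × List String :=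
  if modA c then (if st.1 ≠ "" then st else (String.ofList [c], st.2))
  else if faceA c then ("", st.2 ++ [String.ofList [c] ++ st.1])
  else if PySem.Chars.isspace c then st
  else st

def parse_moves_alt (moves_str : String) : List String :=
  let st := ((PySem.Chars.strip moves_str.toList).reverse).foldl stepB ("", [])
  st.2.reverse

-- ===== PRECONDITION & SPEC =====
-- Pre_ admits exactly the inputs on which the Python A returns (no ValueError):
-- after stripping, every character is a face letter, a modifier or whitespace,
-- every modifier is immediately preceded by a face letter, and the first
-- character is not a modifier.
def okCharPre (c : Char) : Bool := faceA c || modA c || PySem.Chars.isspace c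

def preB (moves_str : String) : Bool :=
  let l := PySem.Chars.strip moves_str.toList
  l.all okCharPre && ((l.zip l.tail).all fun p => !modA p.2 || faceA p.1) && !modA (l.headD 'U')

def Pre_parse_moves (moves_str : String) : Prop := preB moves_str = true

instance (moves_str : String) : Decidable (Pre_parse_moves moves_str) := by
  unfold Pre_parse_moves; infer_instance

def pvWitness_parse_moves : String := "U2 R' F"

def Spec_parse_moves (moves_str : String) (out : List String) : Prop := out = parse_moves_alt moves_str
instance (moves_str : String) (out : List String) : Decidable (Spec_parse_moves moves_str out) := by unfold Spec_parse_moves; infer_instance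

-- ===== CLAIM (what is proved, stated in full; the proofs are below) =====
def Claim_equal_parse_moves : Prop := ∀ (moves_str : String), Dom_parse_moves moves_str → Pre_parse_moves moves_str → Spec_parse_moves moves_str (parse_moves moves_str)

-- ===== LEMMAS AND PROOFS =====

-- the precondition, restated on a bare character list
def GoodL (l : List Char) : Prop :=
  (∀ c ∈ l, faceA c = true ∨ modA c = true ∨ PySem.Chars.isspace c = true) ∧
  List.IsChain (fun a b => modA b = true → faceA a = true) l ∧
  modA (l.headD 'U') = false

theorem zip_all_isChain (p : Char → Char → Bool) (l : List Char)
    (h : ((l.zip l.tail).all fun q => p q.1 q.2) = true) :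
    List.IsChain (fun a b => p a b = true) l := by
  induction l with
  | nil => simp
  | cons x t ih =>
    cases t with
    | nil => simp
    | cons y t2 =>
      simp only [List.tail, List.zip_cons_cons, List.all_cons, Bool.and_eq_true] at h
      rw [List.isChain_cons_cons]
      exact ⟨h.1, ih (by simpa using h.2)⟩

theorem pre_good (s : String) (h : Pre_parse_moves s) :
    GoodL (PySem.Chars.strip s.toList) := by
  unfold Pre_parse_moves preB at h
  simp only [Bool.and_eq_true] at h
  refine ⟨?_, ?_, ?_⟩
  · intro c hc
    have := List.all_eq_true.mp h.1.1 c hc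
    simpa [okCharPre, Bool.or_eq_true, or_assoc] using this
  · have hch := zip_all_isChain (fun a b => !modA b || faceA a) _ h.1.2
    exact hch.imp (fun {a b} hab hm => by
      rcases Bool.or_eq_true _ _ |>.mp hab with h1 | h1
      · rw [hm] at h1; exact absurd h1 (by simp)
      · exact h1)
  · simpa using h.2

theorem face_not_mod (c : Char) (h : faceA c = true) : modA c = false := by
  simp [faceA] at h
  rcases h with ((((h|h)|h)|h)|h)|h <;> subst h <;> decide

theorem mod_not_face (c : Char) (h : modA c = true) : faceA c = false := by
  simp [modA] at h
  rcases h with h|h <;> subst h <;> decide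

theorem main_fold (l : List Char) (h : GoodL l) :
    l.foldr (fun c st => stepB st c) ("", []) = ("", (parseLoop l).reverse) := by
  induction l using parseLoop.induct with
  | case1 => simp [parseLoop]
  | case2 c hface =>
    simp only [List.foldr, parseLoop, hface, if_pos]
    simp [stepB, face_not_mod c hface, hface]
  | case3 c hface d rest2 hmod ih =>
    obtain ⟨hmem, hchain, hhd⟩ := h
    rw [List.isChain_cons_cons] at hchain
    have hgood2 : GoodL rest2 := by
      refine ⟨fun x hx => hmem x (by simp [hx]), hchain.2.tail, ?_⟩
      cases rest2 with
      | nil => decide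
      | cons e t =>
        rw [List.isChain_cons_cons] at hchain
        by_contra hem
        simp only [List.headD] at hem
        have := hchain.2.1 (by simpa using hem)
        rw [mod_not_face d hmod] at this
        exact absurd this (by simp)
    simp only [List.foldr, ih hgood2]
    simp [stepB, hmod, hface, face_not_mod c hface,
          parseLoop, ← String.ofList_append]
  | case4 c hface d rest2 hmod' ih =>
    have hmod : modA d = false := by simpa using hmod'
    obtain ⟨hmem, hchain, hhd⟩ := h
    rw [List.isChain_cons_cons] at hchain
    have hgood2 : GoodL (d :: rest2) := by
      refine ⟨fun x hx => hmem x (by simp [hx]), hchain.2, ?_⟩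
      simpa using hmod
    simp only [List.foldr] at ih ⊢
    rw [ih hgood2]
    simp [stepB, hmod, hface, face_not_mod c hface, parseLoop]
  | case5 c rest hface' hspace ih =>
    have hface : faceA c = false := by simpa using hface'
    obtain ⟨hmem, hchain, hhd⟩ := h
    have hmodc : modA c = false := by simpa using hhd
    have hgood : GoodL rest := by
      refine ⟨fun x hx => hmem x (by simp [hx]), hchain.tail, ?_⟩
      cases rest with
      | nil => decide
      | cons e t =>
        rw [List.isChain_cons_cons] at hchain
        by_contra hem
        simp only [List.headD] at hem
        have := hchain.1 (by simpa using hem)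
        rw [hface] at this
        exact absurd this (by simp)
    have heq : parseLoop (c :: rest) = parseLoop rest := by
      conv_lhs => rw [parseLoop.eq_def]
      simp [hface, hspace]
    simp only [List.foldr, ih hgood]
    simp [stepB, hmodc, hface, hspace, heq]
  | case6 c rest hface' hspace' =>
    have hface : faceA c = false := by simpa using hface'
    have hspace : PySem.Chars.isspace c = false := by simpa using hspace'
    obtain ⟨hmem, hchain, hhd⟩ := h
    have hmodc : modA c = false := by simpa using hhd
    rcases hmem c (by simp) with h1|h1|h1
    · rw [h1] at hface; exact absurd hface (by simp)
    · rw [h1] at hmodc; exact absurd hmodc (by simp)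
    · rw [h1] at hspace; exact absurd hspace (by simp)

theorem parse_moves_spec : Claim_equal_parse_moves := by
  intro s _ hpre
  unfold Spec_parse_moves parse_moves parse_moves_alt
  rw [List.foldl_reverse, main_fold _ (pre_good _ hpre)]
  simp
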